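-- pv_equiv track=rewrite | github.com/BangLiu/ACS-QG | util/prepro_utils.py | get_answer_iob
-- ===== SOURCE A (Python) =====
-- def get_answer_iob(original_length, start, end):
--     assert start <= end
--     assert end < original_length
--     answer_iob = ['O'] * original_length
--     answer_iob[start] = 'B'
--     if start < end:
--         for i in range(start + 1, end + 1):
--             answer_iob[i] = 'I'
--     return answer_iob
-- ===== SOURCE B (Python) =====
-- def get_answer_iob(original_length, start, end):
--     assert 0 <= start <= end
--     assert end < original_length
--     return (['O'] * start
--             + ['B']
--             + ['I'] * (end - start)
--             + ['O'] * (original_length - end - 1))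
-- ===== Notes on version B (the rewrite author's own statement) =====
-- stated objective: simpler
-- what changed: B builds the IOB list directly as four homogeneous runs concatenated (O-prefix, B, I-run, O-suffix) instead of allocating an all-O list and mutating it index by index in a loop.
-- outside the precondition, e.g. on get_answer_iob(3, -1, 0): A returns ['I', 'O', 'B'], B raises AssertionError
import Mathlib
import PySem

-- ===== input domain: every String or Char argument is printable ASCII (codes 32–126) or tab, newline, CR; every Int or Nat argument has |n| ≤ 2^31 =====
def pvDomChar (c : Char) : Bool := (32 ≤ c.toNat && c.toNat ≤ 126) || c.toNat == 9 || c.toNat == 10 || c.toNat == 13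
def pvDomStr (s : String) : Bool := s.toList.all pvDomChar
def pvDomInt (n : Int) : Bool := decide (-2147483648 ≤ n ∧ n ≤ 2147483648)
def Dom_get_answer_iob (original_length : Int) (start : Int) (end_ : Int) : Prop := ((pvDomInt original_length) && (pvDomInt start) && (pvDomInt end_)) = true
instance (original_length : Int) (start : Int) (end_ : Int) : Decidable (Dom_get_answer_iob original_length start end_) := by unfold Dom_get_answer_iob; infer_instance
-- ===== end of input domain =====

-- B replaces A's allocate-then-mutate loop by direct concatenation of four homogeneous runs; equal on Pre_ (0 ≤ start).

-- ===== PORT A =====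
def get_answer_iob (original_length : Int) (start : Int) (end_ : Int) : List String :=
  if start ≤ end_ ∧ end_ < original_length then
    let iob := List.replicate original_length.toNat "O"
    let iob := PySem.List.pySetD iob start "B"
    if start < end_ then
      (PySem.List.pyRange (start + 1) (end_ + 1) 1).foldl
        (fun acc i => PySem.List.pySetD acc i "I") iob
    else iob
  else []  -- assert failure: no value

-- ===== PORT B =====
def get_answer_iob_alt (original_length : Int) (start : Int) (end_ : Int) : List String :=
  if 0 ≤ start ∧ start ≤ end_ ∧ end_ < original_length then
    List.replicate start.toNat "O" ++ ["B"]
      ++ List.replicate (end_ - start).toNat "I"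
      ++ List.replicate (original_length - end_ - 1).toNat "O"
  else []  -- assert failure: no value

-- ===== PRECONDITION & SPEC =====
-- Pre_ excludes negative start (A's negative-index wraparound writes the tags at
-- wrapped positions, an artefact outside the natural token-span domain; B's extra
-- assert raises there) and the inputs where A's asserts or indexing raise.
def Pre_get_answer_iob (original_length : Int) (start : Int) (end_ : Int) : Prop :=
  0 ≤ start ∧ start ≤ end_ ∧ end_ < original_length
instance (original_length : Int) (start : Int) (end_ : Int) : Decidable (Pre_get_answer_iob original_length start end_) := by unfold Pre_get_answer_iob; infer_instance
def pvWitness_get_answer_iob : Int × Int × Int := (5, 1, 3)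

def Spec_get_answer_iob (original_length : Int) (start : Int) (end_ : Int) (out : List String) : Prop := out = get_answer_iob_alt original_length start end_
instance (original_length : Int) (start : Int) (end_ : Int) (out : List String) : Decidable (Spec_get_answer_iob original_length start end_ out) := by unfold Spec_get_answer_iob; infer_instance

-- ===== CLAIM (what is proved, stated in full; the proofs are below) =====
def Claim_equal_get_answer_iob : Prop := ∀ (original_length : Int) (start : Int) (end_ : Int), Dom_get_answer_iob original_length start end_ → Pre_get_answer_iob original_length start end_ → Spec_get_answer_iob original_length start end_ (get_answer_iob original_length start end_)

-- ===== LEMMAS AND PROOFS =====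

-- setting index k of an all-"O" list yields prefix ++ [v] ++ suffix
lemma set_replicate_seg (m k : Nat) (v : String) (hk : k < m) :
    (List.replicate m "O").set k v
      = List.replicate k "O" ++ [v] ++ List.replicate (m - k - 1) "O" := by
  rw [List.set_eq_take_append_cons_drop]
  simp [hk, List.take_replicate, List.drop_replicate, Nat.min_eq_left hk.le]
  omega

lemma repl_rot (n m : Nat) :
    List.replicate n "I" ++ ("I" :: List.replicate m "O")
      = "I" :: (List.replicate n "I" ++ List.replicate m "O") := by
  rw [show ("I" :: List.replicate m "O") = ["I"] ++ List.replicate m "O" from rfl,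
      ← List.append_assoc, ← List.replicate_succ', List.replicate_succ, List.cons_append]

-- A's fill loop over range(s+1, s+n+1+1) produces exactly B's four runs
lemma fold_seg (L s : Int) (n : Nat) (h0 : 0 ≤ s) (hL : s + n < L) :
    (PySem.List.pyRange (s + 1) (s + n + 1) 1).foldl
        (fun acc i => PySem.List.pySetD acc i "I")
        (PySem.List.pySetD (List.replicate L.toNat "O") s "B")
      = List.replicate s.toNat "O" ++ ["B"] ++ List.replicate n "I"
          ++ List.replicate (L - (s + n) - 1).toNat "O" := by
  induction n with
  | zero =>
      rw [PySem.List.pyRange_one_eq_nil (by omega)]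
      simp only [List.foldl_nil]
      rw [PySem.List.pySetD_of_nonneg _ _ h0,
          set_replicate_seg L.toNat s.toNat "B" (by omega)]
      have : L.toNat - s.toNat - 1 = (L - (s + 0) - 1).toNat := by omega
      simp [this]
  | succ n ih =>
      have hL' : s + n < L := by push_cast at hL ⊢; omega
      rw [show (s + (n+1:Nat) + 1 : Int) = (s + n + 1) + 1 by push_cast; ring,
          PySem.List.pyRange_one_succ_right (by omega), List.foldl_append]
      rw [ih hL']
      simp only [List.foldl_cons, List.foldl_nil]
      rw [PySem.List.pySetD_of_nonneg _ _ (by omega : (0:Int) ≤ s + n + 1)]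
      have hsplit : (L - (s + n) - 1).toNat = 1 + (L - (s + (n+1:Nat)) - 1).toNat := by
        push_cast at hL ⊢; omega
      rw [hsplit]
      have hidx : ((s + n + 1 : Int)).toNat = (List.replicate s.toNat "O" ++ ["B"] ++ List.replicate n "I").length := by
        simp; omega
      rw [List.set_append_right _ _ (le_of_eq hidx.symm), hidx]
      simp [Nat.one_add, List.replicate_succ, List.append_assoc, repl_rot]

-- ===== VERDICT (by name: the statement is the Claim_ definition above) =====
theorem get_answer_iob_spec : Claim_equal_get_answer_iob := by
  intro L s e _ hpre
  obtain ⟨h0, hse, heL⟩ := hpre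
  simp only [Spec_get_answer_iob, get_answer_iob, get_answer_iob_alt]
  rw [if_pos (show (0:Int) ≤ s ∧ s ≤ e ∧ e < L from ⟨h0, hse, heL⟩),
      if_pos (show s ≤ e ∧ e < L from ⟨hse, heL⟩)]
  by_cases hlt : s < e
  · rw [if_pos hlt]
    have hrange : (e + 1 : Int) = s + ((e - s).toNat : Int) + 1 := by omega
    rw [hrange, fold_seg L s (e - s).toNat h0 (by omega)]
    have h2 : (L - (s + ((e - s).toNat : Int)) - 1).toNat = (L - e - 1).toNat := by omega
    rw [h2]
  · rw [if_neg hlt]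
    have he : e = s := by omega
    subst he
    rw [PySem.List.pySetD_of_nonneg _ _ h0, set_replicate_seg L.toNat e.toNat "B" (by omega)]
    have h3 : L.toNat - e.toNat - 1 = (L - e - 1).toNat := by omega
    simp [h3]
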